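-- pv_equiv track=rewrite | github.com/bprzybysz/graphmcp | concrete/enhanced_pattern_discovery.py | _validate_database_reference
-- ===== SOURCE A (Python) =====
-- def _validate_database_reference(content: str, database_name: str) -> bool:
--     """Validate that content actually contains meaningful database references."""
--     # Check for various forms of the database name
--     patterns = [
--         database_name,
--         database_name.upper(),
--         database_name.lower(),
--         database_name.replace('_', '-'),
--         database_name.replace('-', '_'),
--     ]
--
--     content_lower = content.lower()
--
--     for pattern in patterns:
--         if pattern.lower() in content_lower:
--             # Additional validation: check it's not just in a comment
--             lines_with_pattern = [
--                 line for line in content.split('\n')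
--                 if pattern.lower() in line.lower()
--             ]
--
--             # At least one line should not be a comment
--             for line in lines_with_pattern:
--                 stripped = line.strip()
--                 if not (stripped.startswith('#') or stripped.startswith('//') or
--                        stripped.startswith('/*') or stripped.startswith('*')):
--                     return True
--
--     return False
-- ===== SOURCE B (Python) =====
-- def _validate_database_reference(content: str, database_name: str) -> bool:
--     """Validate that content actually contains meaningful database references."""
--     # Lowercased name variants, built once.
--     variants = [p.lower() for p in (
--         database_name,
--         database_name.upper(),
--         database_name.lower(),
--         database_name.replace('_', '-'),
--         database_name.replace('-', '_'),
--     )]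
--
--     def hits(line):
--         # A non-comment line that contains any variant.
--         stripped = line.strip()
--         if stripped[:1] == '#' or stripped[:2] in ('//', '/*') or stripped[:1] == '*':
--             return False
--         low = line.lower()
--         return any(v in low for v in variants)
--
--     # Single character-level scan: accumulate the current line, test it at each
--     # newline (and once at the end); the content is never split or re-scanned.
--     cur = []
--     for ch in content:
--         if ch == '\n':
--             if hits(''.join(cur)):
--                 return True
--             cur = []
--         else:
--             cur.append(ch)
--     return hits(''.join(cur))
-- ===== Notes on version B (the rewrite author's own statement) =====
-- stated objective: alternative
-- what changed: Replaces A's per-pattern passes that each re-scan and re-split the whole content with a single character-level scan of the content that accumulates the current line, testing each completed line against a once-built list of lowercased variants and skipping comment lines; the content is never split or scanned more than once.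
import Mathlib
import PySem

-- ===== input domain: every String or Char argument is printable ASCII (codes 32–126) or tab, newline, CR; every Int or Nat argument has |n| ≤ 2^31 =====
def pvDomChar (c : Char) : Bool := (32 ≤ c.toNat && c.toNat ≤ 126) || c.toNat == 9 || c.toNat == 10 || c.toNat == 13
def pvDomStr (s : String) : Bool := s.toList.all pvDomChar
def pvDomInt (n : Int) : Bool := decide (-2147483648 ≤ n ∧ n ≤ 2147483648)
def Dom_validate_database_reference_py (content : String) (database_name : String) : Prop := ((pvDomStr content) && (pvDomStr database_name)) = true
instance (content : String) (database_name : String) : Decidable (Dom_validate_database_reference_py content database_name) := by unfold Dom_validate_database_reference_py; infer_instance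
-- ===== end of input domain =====

-- B replaces A's per-pattern re-scan-and-re-split of the whole content with one
-- character-level scan that tests each completed line as it is assembled (objective: alternative).

-- ===== PORT A =====
-- the five name forms A checks, as A builds them
def pvPatternsA (database_name : String) : List (List Char) :=
  [database_name.toList,
   PySem.Chars.upper database_name.toList,
   PySem.Chars.lower database_name.toList,
   PySem.Chars.replace database_name.toList ['_'] ['-'],
   PySem.Chars.replace database_name.toList ['-'] ['_']]

-- A's inner test: the stripped line does not start with '#', '//', '/*' or '*'
def pvNotCommentA (line : List Char) : Bool :=
  let stripped := PySem.Chars.strip line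
  !(PySem.Chars.startswith stripped ['#'] || PySem.Chars.startswith stripped ['/', '/'] ||
    PySem.Chars.startswith stripped ['/', '*'] || PySem.Chars.startswith stripped ['*'])

def validate_database_reference_py (content : String) (database_name : String) : Bool :=
  let patterns := pvPatternsA database_name
  let content_lower := PySem.Chars.lower content.toList
  -- for pattern in patterns: if pattern.lower() in content_lower: … return True / fall through
  patterns.any (fun pattern =>
    PySem.Chars.isIn (PySem.Chars.lower pattern) content_lower &&
      -- lines_with_pattern = [line for line in content.split('\n') if pattern.lower() in line.lower()]
      ((PySem.Chars.splitOn content.toList ['\n']).filter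
        (fun line => PySem.Chars.isIn (PySem.Chars.lower pattern) (PySem.Chars.lower line))).any
        pvNotCommentA)

-- ===== PORT B =====
-- B's per-line test: stripped[:1] == '#' / '*' or stripped[:2] in ('//','/*') rejects the
-- line, otherwise any lowercased variant occurring in the lowered line accepts it
-- (the slice comparisons are exactly the first-one/two-character patterns matched here)
def pvHitsB (variants : List (List Char)) (line : List Char) : Bool :=
  match PySem.Chars.strip line with
  | '#' :: _ => false
  | '/' :: '/' :: _ => false
  | '/' :: '*' :: _ => false
  | '*' :: _ => false
  | _ => variants.any (fun v => PySem.Chars.isIn v (PySem.Chars.lower line))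

-- B's scan loop: cur accumulates the current line (reversed); at '\n' the finished
-- line is tested and on success the scan stops with true
def pvScanB (variants : List (List Char)) : List Char → List Char → Bool
  | [], cur => pvHitsB variants cur.reverse
  | c :: rest, cur =>
    if c = '\n' then pvHitsB variants cur.reverse || pvScanB variants rest []
    else pvScanB variants rest (c :: cur)

def validate_database_reference_py_alt (content : String) (database_name : String) : Bool :=
  let variants :=
    [PySem.Chars.lower database_name.toList,
     PySem.Chars.lower (PySem.Chars.upper database_name.toList),
     PySem.Chars.lower (PySem.Chars.lower database_name.toList),
     PySem.Chars.lower (PySem.Chars.replace database_name.toList ['_'] ['-']),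
     PySem.Chars.lower (PySem.Chars.replace database_name.toList ['-'] ['_'])]
  pvScanB variants content.toList []

-- ===== PRECONDITION & SPEC =====
def Spec_validate_database_reference_py (content : String) (database_name : String) (out : Bool) : Prop := out = validate_database_reference_py_alt content database_name
instance (content : String) (database_name : String) (out : Bool) : Decidable (Spec_validate_database_reference_py content database_name out) := by unfold Spec_validate_database_reference_py; infer_instance

-- ===== CLAIM =====
def Claim_equal_validate_database_reference_py : Prop := ∀ (content : String) (database_name : String), Dom_validate_database_reference_py content database_name → Spec_validate_database_reference_py content database_name (validate_database_reference_py content database_name)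

-- ===== LEMMAS AND PROOFS =====

-- proof-only model of splitting at '\n' with an accumulated current line
def pvLinesAux : List Char → List Char → List (List Char)
  | [], cur => [cur.reverse]
  | c :: rest, cur =>
    if c = '\n' then cur.reverse :: pvLinesAux rest []
    else pvLinesAux rest (c :: cur)

theorem pv_go_spec : ∀ (fuel : Nat) (l cur : List Char) (acc : List (List Char)),
    l.length < fuel →
    PySem.Chars.splitOn.go ['\n'] fuel l cur acc = acc.reverse ++ pvLinesAux l cur := by
  intro fuel
  induction fuel with
  | zero => intro l cur acc h; omega
  | succ fuel ih =>
    intro l cur acc h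
    match l with
    | [] => simp [PySem.Chars.splitOn.go, pvLinesAux]
    | c :: rest =>
      rw [PySem.Chars.splitOn.go]
      by_cases hc : c = '\n'
      · subst hc
        have hp : List.isPrefixOf ['\n'] ('\n' :: rest) = true := by
          simp [List.isPrefixOf]
        simp only [hp, if_true, List.length_singleton, List.drop_succ_cons, List.drop_zero]
        rw [ih rest [] _ (by simpa using Nat.lt_of_succ_lt_succ h)]
        simp [pvLinesAux]
      · have hp : List.isPrefixOf ['\n'] (c :: rest) = false := by
          simp [List.isPrefixOf]; exact fun hcc => absurd hcc.symm hc
        simp only [hp, Bool.false_eq_true, if_false]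
        rw [ih rest (c :: cur) acc (by simpa using Nat.lt_of_succ_lt_succ h)]
        simp [pvLinesAux, hc]

theorem pv_splitOn_eq_linesAux (cs : List Char) :
    PySem.Chars.splitOn cs ['\n'] = pvLinesAux cs [] := by
  unfold PySem.Chars.splitOn
  rw [pv_go_spec (cs.length + 1) cs [] [] (by omega)]
  simp

-- B's scan equals testing every line produced by pvLinesAux
theorem pv_scan_eq (vs : List (List Char)) :
    ∀ (l cur : List Char), pvScanB vs l cur = (pvLinesAux l cur).any (pvHitsB vs) := by
  intro l
  induction l with
  | nil => intro cur; simp [pvScanB, pvLinesAux]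
  | cons c rest ih =>
    intro cur
    by_cases hc : c = '\n'
    · subst hc; simp [pvScanB, pvLinesAux, ih]
    · simp [pvScanB, pvLinesAux, hc, ih]

-- B's per-line test, phrased with A's comment check
theorem pv_hits_eq (vs : List (List Char)) (line : List Char) :
    pvHitsB vs line =
      (pvNotCommentA line && vs.any (fun v => PySem.Chars.isIn v (PySem.Chars.lower line))) := by
  unfold pvHitsB pvNotCommentA
  rcases h : PySem.Chars.strip line with _ | ⟨c, _ | ⟨d, rest⟩⟩ <;>
    simp only [PySem.Chars.startswith, List.isPrefixOf, Bool.and_true, Bool.and_false] <;>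
    [skip; (by_cases h1 : '#' = c <;> by_cases h2 : '/' = c <;> by_cases h3 : '*' = c);
     (by_cases h1 : '#' = c <;> by_cases h2 : '/' = c <;> by_cases h3 : '*' = c <;>
      by_cases h4 : '/' = d <;> by_cases h5 : '*' = d)] <;>
    subst_vars <;> simp_all [beq_iff_eq] <;> split <;> simp_all [beq_iff_eq]

-- every assembled line is an infix of the scanned characters
theorem pv_linesAux_infix : ∀ (l cur : List Char), ∀ x ∈ pvLinesAux l cur,
    x <:+: (cur.reverse ++ l) := by
  intro l
  induction l with
  | nil => intro cur x hx; simp [pvLinesAux] at hx; simp [hx]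
  | cons c rest ih =>
    intro cur x hx
    by_cases hc : c = '\n'
    · subst hc
      simp [pvLinesAux] at hx
      rcases hx with h | h
      · exact ⟨[], '\n' :: rest, by simp [h]⟩
      · have hx' : x <:+: rest := by simpa using ih [] x (by simpa using h)
        exact hx'.trans ⟨cur.reverse ++ ['\n'], [], by simp⟩
    · simp [pvLinesAux, hc] at hx
      simpa using ih (c :: cur) x hx

theorem pv_mem_splitOn_infix (cs l : List Char)
    (h : l ∈ PySem.Chars.splitOn cs ['\n']) : l <:+: cs := by
  rw [pv_splitOn_eq_linesAux] at h
  simpa using pv_linesAux_infix cs [] l h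

theorem pv_lower_infix {a b : List Char} (h : a <:+: b) :
    PySem.Chars.lower a <:+: PySem.Chars.lower b := by
  simpa [PySem.Chars.lower] using h.map PySem.Chars.lowerChar

-- B rephrased over A's split lines, comment check and pattern list
theorem pv_alt_eq (content : String) (database_name : String) :
    validate_database_reference_py_alt content database_name
      = (PySem.Chars.splitOn content.toList ['\n']).any (fun l =>
          pvNotCommentA l &&
            ((pvPatternsA database_name).map PySem.Chars.lower).any
              (fun v => PySem.Chars.isIn v (PySem.Chars.lower l))) := by
  unfold validate_database_reference_py_alt
  rw [pv_scan_eq, ← pv_splitOn_eq_linesAux]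
  refine congrArg (List.any _) (funext fun l => ?_)
  rw [pv_hits_eq]
  simp [pvPatternsA]

-- ===== VERDICT =====
theorem validate_database_reference_py_spec : Claim_equal_validate_database_reference_py := by
  intro content database_name _
  unfold Spec_validate_database_reference_py
  rw [pv_alt_eq, Bool.eq_iff_iff]
  unfold validate_database_reference_py
  simp only [List.any_eq_true, List.mem_filter, List.any_map, Function.comp,
    Bool.and_eq_true]
  constructor
  · rintro ⟨p, hp, -, l, ⟨hl, hin⟩, hok⟩
    exact ⟨l, hl, hok, p, hp, hin⟩
  · rintro ⟨l, hl, hok, p, hp, hin⟩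
    have hcont : PySem.Chars.isIn (PySem.Chars.lower p)
        (PySem.Chars.lower content.toList) = true := by
      rw [PySem.Chars.isIn_iff_infix] at hin ⊢
      exact hin.trans (pv_lower_infix (pv_mem_splitOn_infix _ _ hl))
    exact ⟨p, hp, hcont, l, ⟨hl, hin⟩, hok⟩
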